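-- pv_equiv track=rewrite | github.com/nnbn29082009-bot/sunwin-bot | 🐉SunWin.Pro🐉.py | do_ben
-- ===== SOURCE A (Python) =====
-- def do_ben(data):
--     if not data:
--         return 0
--     last = data[-1]
--     count = 0
--     for i in reversed(data):
--         if i == last:
--             count += 1
--         else:
--             break
--     return count if count >= 3 else 0
-- ===== SOURCE B (Python) =====
-- def do_ben(data):
--     # forward single pass: maintain (previous value, current run length); no reversal, no break
--     if not data:
--         return 0
--     prev = data[0]
--     run = 1
--     for y in data[1:]:
--         if y == prev:
--             run += 1
--         else:
--             prev = y
--             run = 1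
--     return run if run >= 3 else 0
-- ===== Notes on version B (the rewrite author's own statement) =====
-- stated objective: alternative
-- what changed: Replaces A's reversed-iteration scan with early break by a forward single pass that maintains (previous value, current run length) and checks the threshold at the end.
import Mathlib
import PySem

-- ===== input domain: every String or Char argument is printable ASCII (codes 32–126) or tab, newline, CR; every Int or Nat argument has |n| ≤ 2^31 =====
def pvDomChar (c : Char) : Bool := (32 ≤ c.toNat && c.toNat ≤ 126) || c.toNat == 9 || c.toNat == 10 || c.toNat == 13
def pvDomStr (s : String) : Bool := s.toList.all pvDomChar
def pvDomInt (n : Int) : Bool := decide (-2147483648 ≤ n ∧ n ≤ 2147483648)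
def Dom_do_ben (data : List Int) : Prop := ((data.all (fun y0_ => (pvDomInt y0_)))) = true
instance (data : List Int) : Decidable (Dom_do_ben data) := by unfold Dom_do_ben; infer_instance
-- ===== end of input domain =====

-- B: forward single pass maintaining (previous value, current run length) instead of A's reversed scan with break; equal return value proved below.
-- ===== PORT A =====
-- the 'for i in reversed(data): … break' loop, as structural recursion over data.reverse
def do_benLoop (last : Int) : List Int → Int → Int
  | [], count => count
  | i :: rest, count => if i = last then do_benLoop last rest (count + 1) else count

def do_ben (data : List Int) : Int :=
  match data.getLast? with
  | none => 0
  | some last =>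
      let count := do_benLoop last data.reverse 0
      if count ≥ 3 then count else 0

-- ===== PORT B =====
def do_ben_alt (data : List Int) : Int :=
  match data with
  | [] => 0
  | x :: rest =>
      let st := rest.foldl (fun (s : Int × Int) y => if y = s.1 then (s.1, s.2 + 1) else (y, 1)) (x, 1)
      if st.2 ≥ 3 then st.2 else 0

-- ===== PRECONDITION & SPEC =====
def Spec_do_ben (data : List Int) (out : Int) : Prop := out = do_ben_alt data
instance (data : List Int) (out : Int) : Decidable (Spec_do_ben data out) := by unfold Spec_do_ben; infer_instance

-- ===== CLAIM (what is proved, stated in full; the proofs are below) =====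
def Claim_equal_do_ben : Prop := ∀ (data : List Int), Dom_do_ben data → Spec_do_ben data (do_ben data)

-- ===== LEMMAS AND PROOFS =====

-- ===== VERDICT (by name: the statement is the Claim_ definition above) =====
lemma loop_eq (last : Int) : ∀ (l : List Int) (c : Int),
    do_benLoop last l c = c + ((l.takeWhile (fun i => i = last)).length : Int) := by
  intro l
  induction l with
  | nil => intro c; simp [do_benLoop]
  | cons i rest ih =>
      intro c
      by_cases h : i = last
      · simp [do_benLoop, List.takeWhile, h, ih]; ring
      · simp [do_benLoop, List.takeWhile, h]

lemma fold_eq : ∀ (rest : List Int) (x : Int),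
    rest.foldl (fun (s : Int × Int) y => if y = s.1 then (s.1, s.2 + 1) else (y, 1)) (x, 1)
      = ((x :: rest).reverse.headI,
         (((x :: rest).reverse.takeWhile (fun i => i = (x :: rest).reverse.headI)).length : Int)) := by
  intro rest
  induction rest using List.reverseRecOn with
  | nil => intro x; simp
  | append_singleton ys y ih =>
      intro x
      obtain ⟨hd, tl, he⟩ : ∃ hd tl, (x :: ys).reverse = hd :: tl := by
        rcases hn : (x :: ys).reverse with _ | ⟨a, b⟩
        · exact absurd hn (by simp)
        · exact ⟨a, b, rfl⟩
      have hrev : ((x :: ys) ++ [y]).reverse = y :: hd :: tl := by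
        rw [List.reverse_append, he]; rfl
      have ih' := ih x
      rw [he] at ih'
      rw [show x :: (ys ++ [y]) = (x :: ys) ++ [y] from rfl, List.foldl_append, ih',
        List.foldl_cons, List.foldl_nil, hrev]
      simp only [List.headI_cons]
      by_cases h : y = hd
      · subst h
        simp
        rfl
      · have h' : ¬ (hd = y) := fun hc => h hc.symm
        simp [h, h']

lemma getLast?_eq_headI_reverse (x : Int) (rest : List Int) :
    (x :: rest).getLast? = some ((x :: rest).reverse.headI) := by
  have h1 : (x :: rest).reverse.head? = (x :: rest).getLast? := List.head?_reverse
  rcases hn : (x :: rest).reverse with _ | ⟨hd, tl⟩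
  · exact absurd hn (by simp)
  · rw [hn] at h1
    exact h1.symm

theorem do_ben_spec : Claim_equal_do_ben := by
  intro data _
  unfold Spec_do_ben
  cases data with
  | nil => rfl
  | cons x rest =>
      simp only [do_ben, do_ben_alt, getLast?_eq_headI_reverse, loop_eq, fold_eq]
      simp
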